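-- pv_equiv track=rewrite | github.com/ngvoicu/kluris | src/kluris/core/mri.py | _build_content_preview
-- ===== SOURCE A (Python) =====
-- def _build_content_preview(content: str) -> tuple[str, bool]:
--     """Build a bounded markdown body preview for the inspector panel."""
--     if not content.strip():
--         return "", False
--
--     lines = content.splitlines()
--     preview_lines: list[str] = []
--     skipped_title = False
--
--     for raw_line in lines:
--         line = raw_line.rstrip()
--         if not skipped_title and line.strip().startswith("# "):
--             skipped_title = True
--             continue
--         if not preview_lines and not line.strip():
--             continue
--         preview_lines.append(line)
--
--     preview = "\n".join(preview_lines).strip()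
--     if not preview:
--         return "", False
--
--     max_lines = 48
--     max_chars = 2800
--     truncated = len(preview_lines) > max_lines or len(preview) > max_chars
--     preview = "\n".join(preview_lines[:max_lines]).strip()
--
--     if len(preview) > max_chars:
--         preview = preview[:max_chars].rstrip()
--         if "\n" in preview:
--             preview = preview.rsplit("\n", 1)[0].rstrip()
--
--     if truncated:
--         preview = preview.rstrip() + "\n\n..."
--
--     return preview, truncated
-- ===== SOURCE B (Python) =====
-- def _drop_title(lines):
--     """Delete the first line (anywhere) whose stripped form starts with '# '."""
--     for i, l in enumerate(lines):
--         if l.strip().startswith("# "):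
--             del lines[i]
--             break
--     return lines
--
--
-- def _truncate(preview_lines):
--     """Bound the preview to 48 lines / 2800 chars, appending '\n\n...' if cut."""
--     preview = "\n".join(preview_lines).strip()
--     if not preview:
--         return "", False
--     truncated = len(preview_lines) > 48 or len(preview) > 2800
--     preview = "\n".join(preview_lines[:48]).strip()
--     if len(preview) > 2800:
--         preview = preview[:2800].rstrip()
--         if "\n" in preview:
--             preview = preview[:preview.rfind("\n")].rstrip()
--     if truncated:
--         preview = preview.rstrip() + "\n\n..."
--     return preview, truncated
--
--
-- def _build_content_preview(content: str) -> tuple[str, bool]: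
--     if not content.strip():
--         return "", False
--     lines = _drop_title([l.rstrip() for l in content.splitlines()])
--     while lines and not lines[0].strip():
--         lines.pop(0)
--     return _truncate(lines)
-- ===== Notes on version B (the rewrite author's own statement) =====
-- stated objective: alternative
-- what changed: Replaces A's single stateful accumulator loop (skipped-title flag and leading-blank suppression interleaved per line) with three separate list stages - map rstrip, delete the first markdown title line, drop leading blank lines - and factors the truncation step into a helper.
import Mathlib
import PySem

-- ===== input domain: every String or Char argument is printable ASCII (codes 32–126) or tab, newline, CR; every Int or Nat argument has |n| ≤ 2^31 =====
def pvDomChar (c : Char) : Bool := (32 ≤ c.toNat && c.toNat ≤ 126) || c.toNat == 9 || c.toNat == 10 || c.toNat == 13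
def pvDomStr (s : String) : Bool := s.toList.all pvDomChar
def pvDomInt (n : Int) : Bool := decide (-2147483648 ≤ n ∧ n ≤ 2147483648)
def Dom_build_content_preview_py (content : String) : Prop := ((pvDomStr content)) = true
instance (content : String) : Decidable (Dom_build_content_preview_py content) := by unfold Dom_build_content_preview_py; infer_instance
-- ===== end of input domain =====

-- B restructures A's single accumulator loop into three list stages (map rstrip / delete first title / drop leading blanks) and a truncation helper; same values everywhere (objective: alternative).

-- shared tiny predicates (used by both ports)
def pvIsTitle (l : String) : Bool := PySem.Str.startswith (PySem.Str.strip l) "# "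
def pvIsBlank (l : String) : Bool := PySem.Str.strip l == ""

-- ===== PORT A =====
-- the body of A's for-loop: state = (preview_lines, skipped_title)
def pvStepA (st : List String × Bool) (raw : String) : List String × Bool :=
  let line := PySem.Str.rstrip raw
  if !st.2 && pvIsTitle line then (st.1, true)
  else if st.1.isEmpty && pvIsBlank line then st
  else (st.1 ++ [line], st.2)

def build_content_preview_py (content : String) : String × Bool :=
  if PySem.Str.strip content = "" then ("", false)
  else
    let lines := PySem.Str.splitlines content
    let preview_lines := (lines.foldl pvStepA ([], false)).1
    let preview := PySem.Str.strip (PySem.Str.join "\n" preview_lines)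
    if preview = "" then ("", false)
    else
      let truncated : Bool :=
        decide ((preview_lines.length : Int) > 48 ∨ PySem.Str.len preview > 2800)
      let preview := PySem.Str.strip (PySem.Str.join "\n" (PySem.List.slice preview_lines none (some 48)))
      let preview :=
        if PySem.Str.len preview > 2800 then
          let p := PySem.Str.rstrip (PySem.Str.slice preview none (some 2800))
          if PySem.Str.isIn "\n" p then
            -- p.rsplit("\n", 1)[0]: exact here because the guard ensures "\n" occurs in p,
            -- so the first rsplit piece is p[:p.rfind("\n")]
            PySem.Str.rstrip (PySem.Str.slice p none (some (PySem.Str.rfind p "\n")))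
          else p
        else preview
      if truncated then (PySem.Str.join "" [PySem.Str.rstrip preview, "\n\n..."], truncated)
      else (preview, truncated)

-- ===== PORT B =====
-- Source B's _drop_title: delete the first line whose stripped form starts with "# "
def pvDropTitle (lines : List String) : List String :=
  match lines.findIdx? (fun l => pvIsTitle l) with
  | some i => lines.eraseIdx i
  | none => lines

-- Source B's _truncate
def pvTruncate (preview_lines : List String) : String × Bool :=
  let preview := PySem.Str.strip (PySem.Str.join "\n" preview_lines)
  if preview = "" then ("", false)
  else
    let truncated : Bool :=
      decide ((preview_lines.length : Int) > 48 ∨ PySem.Str.len preview > 2800)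
    let preview := PySem.Str.strip (PySem.Str.join "\n" (PySem.List.slice preview_lines none (some 48)))
    let preview :=
      if PySem.Str.len preview > 2800 then
        let p := PySem.Str.rstrip (PySem.Str.slice preview none (some 2800))
        if PySem.Str.isIn "\n" p then
          -- p[:p.rfind("\n")] (the guard ensures "\n" occurs in p)
          PySem.Str.rstrip (PySem.Str.slice p none (some (PySem.Str.rfind p "\n")))
        else p
      else preview
    if truncated then (PySem.Str.join "" [PySem.Str.rstrip preview, "\n\n..."], truncated)
    else (preview, truncated)

def build_content_preview_py_alt (content : String) : String × Bool :=
  if PySem.Str.strip content = "" then ("", false)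
  else
    let lines := pvDropTitle ((PySem.Str.splitlines content).map PySem.Str.rstrip)
    pvTruncate (lines.dropWhile (fun l => pvIsBlank l))

-- ===== PRECONDITION & SPEC =====
def Spec_build_content_preview_py (content : String) (out : String × Bool) : Prop := out = build_content_preview_py_alt content
instance (content : String) (out : String × Bool) : Decidable (Spec_build_content_preview_py content out) := by unfold Spec_build_content_preview_py; infer_instance

-- ===== CLAIM (what is proved, stated in full; the proofs are below) =====
def Claim_equal_build_content_preview_py : Prop := ∀ (content : String), Dom_build_content_preview_py content → Spec_build_content_preview_py content (build_content_preview_py content)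

-- ===== LEMMAS AND PROOFS =====

-- the loop body with the rstrip already applied
def pvStep (st : List String × Bool) (l : String) : List String × Bool :=
  if !st.2 && pvIsTitle l then (st.1, true)
  else if st.1.isEmpty && pvIsBlank l then st
  else (st.1 ++ [l], st.2)

theorem pvDropTitle_nil : pvDropTitle [] = [] := rfl

theorem pvDropTitle_cons (l : String) (ls : List String) :
    pvDropTitle (l :: ls) = if pvIsTitle l then ls else l :: pvDropTitle ls := by
  unfold pvDropTitle
  rw [List.findIdx?_cons]
  by_cases h : pvIsTitle l
  · simp [h]
  · simp only [h]
    cases hf : List.findIdx? (fun l => pvIsTitle l) ls <;> simp [List.eraseIdx]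

-- once the title has been skipped and something accumulated, everything is appended
theorem pvFoldl_true (ls : List String) (acc : List String) (h : acc ≠ []) :
    (ls.foldl pvStep (acc, true)).1 = acc ++ ls := by
  induction ls generalizing acc with
  | nil => simp
  | cons l ls ih =>
      have hne : (acc ++ [l]) ≠ [] := by simp
      have hstep : pvStep (acc, true) l = (acc ++ [l], true) := by simp [pvStep, h]
      rw [List.foldl_cons, hstep, ih _ hne]
      simp

-- title skipped, nothing accumulated yet: drop leading blanks, keep the rest
theorem pvFoldl_true_nil (ls : List String) :
    (ls.foldl pvStep ([], true)).1 = ls.dropWhile (fun l => pvIsBlank l) := by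
  induction ls with
  | nil => simp
  | cons l ls ih =>
      by_cases hb : pvIsBlank l
      · simpa [pvStep, hb, List.dropWhile_cons] using ih
      · simp [pvStep, hb, pvFoldl_true ls [l] (by simp)]

-- title not yet seen, something accumulated: append everything but the first title
theorem pvFoldl_false (ls : List String) (acc : List String) (h : acc ≠ []) :
    (ls.foldl pvStep (acc, false)).1 = acc ++ pvDropTitle ls := by
  induction ls generalizing acc with
  | nil => simp [pvDropTitle_nil]
  | cons l ls ih =>
      rw [pvDropTitle_cons]
      by_cases ht : pvIsTitle l
      · simp [pvStep, ht, pvFoldl_true ls acc h]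
      · have hne : (acc ++ [l]) ≠ [] := by simp
        have hstep : pvStep (acc, false) l = (acc ++ [l], false) := by simp [pvStep, ht, h]
        rw [List.foldl_cons, hstep, ih _ hne]
        simp [ht]

-- the main loop invariant: A's accumulator = B's three-stage pipeline
theorem pvFoldl_main (ls : List String) :
    (ls.foldl pvStep ([], false)).1 = (pvDropTitle ls).dropWhile (fun l => pvIsBlank l) := by
  induction ls with
  | nil => simp [pvDropTitle_nil]
  | cons l ls ih =>
      rw [pvDropTitle_cons]
      by_cases ht : pvIsTitle l
      · simp [pvStep, ht, pvFoldl_true_nil]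
      · by_cases hb : pvIsBlank l
        · simpa [pvStep, ht, hb, List.dropWhile_cons] using ih
        · simp [pvStep, ht, hb, pvFoldl_false ls [l] (by simp)]

theorem pv_lines_eq (lines : List String) :
    (lines.foldl pvStepA ([], false)).1
      = (pvDropTitle (lines.map PySem.Str.rstrip)).dropWhile (fun l => pvIsBlank l) := by
  have h : lines.foldl pvStepA ([], false)
      = (lines.map PySem.Str.rstrip).foldl pvStep ([], false) := by
    rw [List.foldl_map]
    rfl
  rw [h, pvFoldl_main]

-- ===== VERDICT (by name: the statement is the Claim_ definition above) =====
theorem build_content_preview_py_spec : Claim_equal_build_content_preview_py := by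
  intro content _
  unfold Spec_build_content_preview_py build_content_preview_py build_content_preview_py_alt
  by_cases hg : PySem.Str.strip content = ""
  · simp [hg]
  · simp only [hg, if_false]
    rw [pv_lines_eq (PySem.Str.splitlines content)]
    rfl
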